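-- pv_equiv track=rewrite | github.com/mh0x/twister | twister.py | generate
-- ===== SOURCE A (Python) =====
-- import itertools
--
-- def generate(string, edit):
--     strs = []
--     for ed in itertools.product(*[e[1] for e in edit]):
--         chars = list(string)
--         for i, char in enumerate(ed):
--             chars[edit[i][0]] += char
--         chars = ''.join(chars)
--         if len(chars) <= 15:
--             strs.append(chars)
--     return strs
-- ===== SOURCE B (Python) =====
-- def generate(string, edit):
--     # Recursive decomposition: walk the edit list position by position instead of
--     # materialising itertools.product; if any edit offers no options the product
--     # is empty, so nothing is generated.
--     if any(not e[1] for e in edit):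
--         return []
--
--     def rec(eds, chars):
--         if not eds:
--             s = ''.join(chars)
--             return [s] if len(s) <= 15 else []
--         pos, opts = eds[0]
--         out = []
--         for ch in opts:
--             new = list(chars)
--             new[pos] = new[pos] + ch
--             out.extend(rec(eds[1:], new))
--         return out
--
--     return rec(edit, list(string))
-- ===== Notes on version B (the rewrite author's own statement) =====
-- stated objective: alternative
-- what changed: Replaces itertools.product plus a per-tuple re-application of all edits with a recursive walk over the edit list that applies each edit once per branch and shares the partially edited character list across the subtree; an up-front empty-options check replaces product's implicit empty result.
import Mathlib
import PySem

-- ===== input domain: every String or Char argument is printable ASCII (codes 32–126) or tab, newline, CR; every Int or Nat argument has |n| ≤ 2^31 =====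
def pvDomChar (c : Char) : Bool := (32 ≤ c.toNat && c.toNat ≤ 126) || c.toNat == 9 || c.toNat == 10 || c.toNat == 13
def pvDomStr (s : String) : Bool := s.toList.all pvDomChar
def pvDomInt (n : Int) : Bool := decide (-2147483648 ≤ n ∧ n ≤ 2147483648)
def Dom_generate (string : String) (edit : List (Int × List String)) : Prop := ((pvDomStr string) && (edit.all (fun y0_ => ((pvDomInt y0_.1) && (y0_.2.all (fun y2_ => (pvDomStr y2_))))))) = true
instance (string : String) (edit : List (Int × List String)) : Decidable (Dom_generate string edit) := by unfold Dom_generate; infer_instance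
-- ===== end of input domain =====

-- B replaces the itertools.product enumeration by a recursive walk over the edit list
-- (same results in the same order); objective: alternative decomposition, no speed claim.

-- ===== PORT A =====

-- itertools.product(*lists): first list varies slowest
def pvProduct : List (List String) → List (List String)
  | [] => [[]]
  | l :: ls => l.flatMap (fun x => (pvProduct ls).map (fun rest => x :: rest))

-- chars[i] += ch on a Python list of strings (strings as List Char);
-- out-of-range i (IndexError in Python) is excluded by Pre_generate.
def pvAppendAt (cs : List (List Char)) (i : Int) (ch : List Char) : List (List Char) :=
  PySem.List.pySetD cs i (PySem.List.pyGetD cs i [] ++ ch)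

def generate (string : String) (edit : List (Int × List String)) : List String :=
  (pvProduct (edit.map (fun e => e.2))).foldl (fun strs ed =>
    let chars0 := string.toList.map (fun c => [c])
    let chars := (PySem.List.enumerate ed).foldl
      (fun cs p => pvAppendAt cs (PySem.List.pyGetD edit p.1 (0, [])).1 p.2.toList) chars0
    let s := PySem.Chars.join [] chars
    if s.length ≤ 15 then strs ++ [String.ofList s] else strs) []

-- ===== PORT B =====

def pvGenRec (chars : List (List Char)) : List (Int × List String) → List String
  | [] =>
      let s := PySem.Chars.join [] chars
      if s.length ≤ 15 then [String.ofList s] else []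
  | (pos, opts) :: rest =>
      opts.flatMap (fun ch => pvGenRec (pvAppendAt chars pos ch.toList) rest)

def generate_alt (string : String) (edit : List (Int × List String)) : List String :=
  if edit.any (fun e => e.2.isEmpty) then []
  else pvGenRec (string.toList.map (fun c => [c])) edit

-- ===== PRECONDITION & SPEC =====
-- A raises IndexError iff every edit has at least one option and some edit position is
-- out of range for the string; exactly those inputs are excluded.
def Pre_generate (string : String) (edit : List (Int × List String)) : Prop :=
  (∀ e ∈ edit, e.2 ≠ []) → ∀ e ∈ edit, PySem.Raise.InRange string.toList.length e.1
instance (string : String) (edit : List (Int × List String)) : Decidable (Pre_generate string edit) := by unfold Pre_generate; infer_instance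
def pvWitness_generate : String × (List (Int × List String)) := ("ab", [((0 : Int), ["x"]), ((-1 : Int), ["y", "z"])])

def Spec_generate (string : String) (edit : List (Int × List String)) (out : List String) : Prop := out = generate_alt string edit
instance (string : String) (edit : List (Int × List String)) (out : List String) : Decidable (Spec_generate string edit out) := by unfold Spec_generate; infer_instance

-- ===== CLAIM (what is proved, stated in full; the proofs are below) =====
def Claim_equal_generate : Prop := ∀ (string : String) (edit : List (Int × List String)), Dom_generate string edit → Pre_generate string edit → Spec_generate string edit (generate string edit)

-- ===== LEMMAS AND PROOFS =====

-- every tuple of the product has one component per input list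
theorem pvProduct_length {ls : List (List String)} {ed : List String}
    (h : ed ∈ pvProduct ls) : ed.length = ls.length := by
  induction ls generalizing ed with
  | nil => simp [pvProduct] at h; simp [h]
  | cons l ls ih =>
      simp [pvProduct] at h
      obtain ⟨x, _, rest, hrest, rfl⟩ := h
      simp [ih hrest]

-- B yields nothing once some edit has no options
theorem pvGenRec_eq_nil {edit : List (Int × List String)}
    (h : ∃ e ∈ edit, e.2 = []) (chars : List (List Char)) :
    pvGenRec chars edit = [] := by
  induction edit generalizing chars with
  | nil => simp at h
  | cons e rest ih =>
      obtain ⟨pos, opts⟩ := e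
      rcases h with ⟨e', he', hnil⟩
      rcases List.mem_cons.mp he' with heq | hmem
      · rw [heq] at hnil
        have hopts : opts = [] := hnil
        subst hopts; simp [pvGenRec]
      · simp only [pvGenRec, List.flatMap_eq_nil_iff]
        intro ch _
        exact ih ⟨e', hmem, hnil⟩ _

-- shifting the start of enumerate
theorem pv_enumerate_shift {α : Type} (xs : List α) (s : Int) :
    PySem.List.enumerate xs (s + 1) =
      (PySem.List.enumerate xs s).map (fun p => (p.1 + 1, p.2)) := by
  induction xs generalizing s with
  | nil => simp [PySem.List.enumerate_nil]
  | cons x xs ih => simp [PySem.List.enumerate_cons, ih]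

-- A's inner loop, indexing edit by enumerate position, is the fold over edit.zip ed
theorem pv_inner_eq_zip (edit : List (Int × List String)) (ed : List String)
    (hlen : ed.length = edit.length) (chars : List (List Char)) :
    (PySem.List.enumerate ed).foldl
        (fun cs p => pvAppendAt cs (PySem.List.pyGetD edit p.1 (0, [])).1 p.2.toList) chars
      = (edit.zip ed).foldl (fun cs q => pvAppendAt cs q.1.1 q.2.toList) chars := by
  induction ed generalizing edit chars with
  | nil =>
      have : edit = [] := by
        cases edit with
        | nil => rfl
        | cons e es => simp at hlen
      subst this; simp [PySem.List.enumerate_nil]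
  | cons x xs ih =>
      cases edit with
      | nil => simp at hlen
      | cons e es =>
          simp only [PySem.List.enumerate_cons, List.foldl_cons, List.zip_cons_cons]
          rw [show (0 : Int) + 1 = 1 by norm_num,
              show (1 : Int) = 0 + 1 by norm_num, pv_enumerate_shift, List.foldl_map]
          rw [PySem.List.pyGetD_zero_cons]
          have hcong :
              (PySem.List.enumerate xs 0).foldl
                  (fun cs p => pvAppendAt cs (PySem.List.pyGetD (e :: es) (p.1 + 1) (0, [])).1 p.2.toList)
                  (pvAppendAt chars e.1 x.toList)
                = (PySem.List.enumerate xs 0).foldl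
                  (fun cs p => pvAppendAt cs (PySem.List.pyGetD es p.1 (0, [])).1 p.2.toList)
                  (pvAppendAt chars e.1 x.toList) := by
            apply PySem.List.foldl_congr_mem
            intro cs p hp
            rw [PySem.List.mem_enumerate_iff] at hp
            obtain ⟨k, hk, rfl⟩ := hp
            have h1 : ((0 : Int) + k) + 1 = ((k + 1 : Nat) : Int) := by push_cast; ring
            have h2 : (0 : Int) + k = ((k : Nat) : Int) := by omega
            rw [h1, PySem.List.pyGetD_natCast, h2, PySem.List.pyGetD_natCast]
            simp
          rw [hcong]
          exact ih es (by simpa using hlen) _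

-- core correspondence: A's fold over the product equals B's recursion
theorem pv_main (edit : List (Int × List String)) (chars : List (List Char))
    (acc : List String) :
    (pvProduct (edit.map (fun e => e.2))).foldl (fun strs ed =>
        let c := (edit.zip ed).foldl (fun cs q => pvAppendAt cs q.1.1 q.2.toList) chars
        let s := PySem.Chars.join [] c
        if s.length ≤ 15 then strs ++ [String.ofList s] else strs) acc
      = acc ++ pvGenRec chars edit := by
  induction edit generalizing chars acc with
  | nil =>
      simp only [List.map_nil, pvProduct, List.foldl_cons, List.foldl_nil, List.zip_nil_left,
        pvGenRec]
      split <;> simp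
  | cons e rest ih =>
      obtain ⟨pos, opts⟩ := e
      simp only [List.map_cons, pvProduct, pvGenRec]
      rw [List.foldl_flatMap]
      have hstep : ∀ (a : List String) (x : String),
          ((pvProduct (rest.map (fun e => e.2))).map (fun r => x :: r)).foldl
            (fun strs ed =>
              let c := (((pos, opts) :: rest).zip ed).foldl (fun cs q => pvAppendAt cs q.1.1 q.2.toList) chars
              let s := PySem.Chars.join [] c
              if s.length ≤ 15 then strs ++ [String.ofList s] else strs) a
          = a ++ pvGenRec (pvAppendAt chars pos x.toList) rest := by
        intro a x
        rw [List.foldl_map]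
        simpa using ih (pvAppendAt chars pos x.toList) a
      calc opts.foldl (fun a x =>
              ((pvProduct (rest.map (fun e => e.2))).map (fun r => x :: r)).foldl
                (fun strs ed =>
                  let c := (((pos, opts) :: rest).zip ed).foldl (fun cs q => pvAppendAt cs q.1.1 q.2.toList) chars
                  let s := PySem.Chars.join [] c
                  if s.length ≤ 15 then strs ++ [String.ofList s] else strs) a) acc
          = opts.foldl (fun a x => a ++ pvGenRec (pvAppendAt chars pos x.toList) rest) acc := by
              apply PySem.List.foldl_congr_mem
              intro a x _
              exact hstep a x
        _ = acc ++ opts.flatMap (fun x => pvGenRec (pvAppendAt chars pos x.toList) rest) :=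
              PySem.List.foldl_append_eq_flatMap _ _ _

theorem generate_eq_rec (string : String) (edit : List (Int × List String)) :
    generate string edit = pvGenRec (string.toList.map (fun c => [c])) edit := by
  unfold generate
  have hcong :
      (pvProduct (edit.map (fun e => e.2))).foldl (fun strs ed =>
          let chars0 := string.toList.map (fun c => [c])
          let chars := (PySem.List.enumerate ed).foldl
            (fun cs p => pvAppendAt cs (PySem.List.pyGetD edit p.1 (0, [])).1 p.2.toList) chars0
          let s := PySem.Chars.join [] chars
          if s.length ≤ 15 then strs ++ [String.ofList s] else strs) []
        = (pvProduct (edit.map (fun e => e.2))).foldl (fun strs ed =>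
          let c := (edit.zip ed).foldl (fun cs q => pvAppendAt cs q.1.1 q.2.toList)
            (string.toList.map (fun c => [c]))
          let s := PySem.Chars.join [] c
          if s.length ≤ 15 then strs ++ [String.ofList s] else strs) [] := by
    apply PySem.List.foldl_congr_mem
    intro strs ed hed
    have hlen : ed.length = edit.length := by
      simpa using pvProduct_length hed
    simp only [pv_inner_eq_zip edit ed hlen]
  rw [hcong, pv_main]
  simp

-- ===== VERDICT (by name: the statement is the Claim_ definition above) =====
theorem generate_spec : Claim_equal_generate := by
  intro string edit _ _
  unfold Spec_generate generate_alt
  rw [generate_eq_rec]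
  split
  · next h =>
      simp only [List.any_eq_true, List.isEmpty_iff] at h
      exact pvGenRec_eq_nil h _
  · rfl
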